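-- pv_equiv track=rewrite | github.com/RoshiniMadisetty/port-status-monitoring-tool | monitor_dashboard.py | parse_flows_from_events
-- ===== SOURCE A (Python) =====
-- def parse_flows_from_events(events):
--     """Get recent flow install events."""
--     flows = []
--     for ev in reversed(events):
--         if ev.get('event') in ('FLOW_INSTALLED', 'RULES_INSTALLED'):
--             flows.append(ev)
--         if len(flows) >= 10:
--             break
--     return flows
-- ===== SOURCE B (Python) =====
-- def parse_flows_from_events(events):
--     """Get recent flow install events."""
--     matching = [ev for ev in events if ev.get('event') in ('FLOW_INSTALLED', 'RULES_INSTALLED')]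
--     return matching[-10:][::-1]
-- ===== Notes on version B (the rewrite author's own statement) =====
-- stated objective: idiomatic
-- what changed: Replaces the reverse scan with an early break and an accumulator by a forward filter comprehension followed by a trailing slice [-10:] and a reversal [::-1].
import Mathlib
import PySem

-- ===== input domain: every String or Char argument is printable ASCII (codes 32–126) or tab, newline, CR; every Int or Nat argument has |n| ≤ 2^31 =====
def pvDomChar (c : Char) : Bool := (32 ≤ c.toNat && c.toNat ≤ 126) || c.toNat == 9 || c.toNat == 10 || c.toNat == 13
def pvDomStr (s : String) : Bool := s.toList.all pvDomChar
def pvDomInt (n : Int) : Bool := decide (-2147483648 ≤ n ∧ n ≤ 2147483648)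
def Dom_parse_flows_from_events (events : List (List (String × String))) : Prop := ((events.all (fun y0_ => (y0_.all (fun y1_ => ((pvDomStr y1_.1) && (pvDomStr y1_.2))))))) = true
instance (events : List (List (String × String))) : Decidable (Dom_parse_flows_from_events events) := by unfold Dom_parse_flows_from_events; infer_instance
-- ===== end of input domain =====

-- B replaces A's reverse scan with an early break by a forward filter plus trailing slice plus reversal (idiomatic decomposition; same O(n) cost).

-- ===== PORT A =====
-- ev.get('event') in ('FLOW_INSTALLED', 'RULES_INSTALLED')  (get returns None when absent; None is not in the tuple)
def pvIsFlowEvent (ev : List (String × String)) : Bool :=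
  (PySem.Dict.mk ev).get? "event" == some "FLOW_INSTALLED" || (PySem.Dict.mk ev).get? "event" == some "RULES_INSTALLED"

-- the 'for ev in reversed(events)' loop with accumulator 'flows' and the 'len(flows) >= 10: break'
def pvLoopA : List (List (String × String)) → List (List (String × String)) → List (List (String × String))
  | [], flows => flows
  | ev :: rest, flows =>
      let flows' := if pvIsFlowEvent ev then flows ++ [ev] else flows
      if flows'.length ≥ 10 then flows' else pvLoopA rest flows'

def parse_flows_from_events (events : List (List (String × String))) : List (List (String × String)) :=
  pvLoopA events.reverse []

-- ===== PORT B =====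
def parse_flows_from_events_alt (events : List (List (String × String))) : List (List (String × String)) :=
  let matching := events.filter pvIsFlowEvent      -- the forward comprehension
  let last10 := PySem.List.slice matching (some (-10)) none      -- matching[-10:]
  (PySem.List.slice? last10 none none (-1)).getD []              -- [::-1] (step -1 ≠ 0, always some)

-- ===== PRECONDITION & SPEC =====
def Spec_parse_flows_from_events (events : List (List (String × String))) (out : List (List (String × String))) : Prop := out = parse_flows_from_events_alt events
instance (events : List (List (String × String))) (out : List (List (String × String))) : Decidable (Spec_parse_flows_from_events events out) := by unfold Spec_parse_flows_from_events; infer_instance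

-- ===== CLAIM (what is proved, stated in full; the proofs are below) =====
def Claim_equal_parse_flows_from_events : Prop := ∀ (events : List (List (String × String))), Dom_parse_flows_from_events events → Spec_parse_flows_from_events events (parse_flows_from_events events)

-- ===== LEMMAS AND PROOFS =====

-- Loop invariant: with fewer than 10 collected, the loop returns the accumulator
-- extended by the next (10 - |flows|) matching events.
theorem pvLoopA_eq (l : List (List (String × String))) :
    ∀ flows : List (List (String × String)), flows.length < 10 →
      pvLoopA l flows = flows ++ (l.filter pvIsFlowEvent).take (10 - flows.length) := by
  induction l with
  | nil => intro flows _; simp [pvLoopA]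
  | cons ev rest ih =>
    intro flows h
    by_cases hp : pvIsFlowEvent ev
    · by_cases hfull : flows.length + 1 ≥ 10
      · have hlen : flows.length = 9 := by omega
        simp [pvLoopA, hp, hlen]
      · have : (flows ++ [ev]).length < 10 := by simp; omega
        rw [show pvLoopA (ev :: rest) flows = pvLoopA rest (flows ++ [ev]) by
              simp [pvLoopA, hp]; intro hc; omega,
            ih _ this]
        simp [List.filter_cons, hp, List.take_succ_cons, show 10 - flows.length = (10 - (flows ++ [ev]).length) + 1 by simp; omega]
    · rw [show pvLoopA (ev :: rest) flows = pvLoopA rest flows by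
            simp [pvLoopA, hp]; intro hc; omega,
          ih _ h]
      simp [List.filter_cons, hp]

theorem parse_flows_from_events_spec : Claim_equal_parse_flows_from_events := by
  unfold Claim_equal_parse_flows_from_events Spec_parse_flows_from_events
  intro events _
  unfold parse_flows_from_events parse_flows_from_events_alt
  dsimp only
  rw [pvLoopA_eq _ [] (by simp),
      PySem.List.slice_from_neg_ofNat _ 10 (by omega),
      PySem.List.slice?_none_none_neg_one]
  simp only [List.nil_append, List.length_nil, Nat.sub_zero, Option.getD_some, List.filter_reverse]
  set m := events.filter pvIsFlowEvent with hm
  rw [List.reverse_drop]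
  by_cases h : m.length ≤ 10
  · simp [Nat.sub_eq_zero_of_le h, List.take_of_length_le (by simpa using h),
      List.take_of_length_le (le_of_eq (List.length_reverse ..) |>.trans h)]
  · congr 1; omega
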